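-- pv_equiv track=rewrite | github.com/jvasso/experiments_manager | src/experiments_manager/config/configResult.py | generate_metric_id
-- ===== SOURCE A (Python) =====
-- import string
-- from itertools import product
--
-- def generate_metric_id(metric, metrics_ids):
--     alphabet = string.ascii_lowercase
--     i = 1
--     while True:
--         for combination in product(alphabet, repeat=i):
--             new_id = ''.join(combination)
--             if new_id not in metrics_ids:
--                 return new_id
--         i += 1
-- ===== SOURCE B (Python) =====
-- def generate_metric_id(metric, metrics_ids):
--     n = 1
--     while True:
--         s = ""
--         m = n
--         while m:
--             m, r = divmod(m - 1, 26)
--             s = chr(97 + r) + s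
--         if s not in metrics_ids:
--             return s
--         n += 1
-- ===== Notes on version B (the rewrite author's own statement) =====
-- stated objective: idiomatic
-- what changed: Replaced the length-by-length itertools.product enumeration with a single flat counter converted to a bijective base-26 string (spreadsheet-column style), so each candidate is produced by arithmetic instead of nested cartesian-product loops.
import Mathlib
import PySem

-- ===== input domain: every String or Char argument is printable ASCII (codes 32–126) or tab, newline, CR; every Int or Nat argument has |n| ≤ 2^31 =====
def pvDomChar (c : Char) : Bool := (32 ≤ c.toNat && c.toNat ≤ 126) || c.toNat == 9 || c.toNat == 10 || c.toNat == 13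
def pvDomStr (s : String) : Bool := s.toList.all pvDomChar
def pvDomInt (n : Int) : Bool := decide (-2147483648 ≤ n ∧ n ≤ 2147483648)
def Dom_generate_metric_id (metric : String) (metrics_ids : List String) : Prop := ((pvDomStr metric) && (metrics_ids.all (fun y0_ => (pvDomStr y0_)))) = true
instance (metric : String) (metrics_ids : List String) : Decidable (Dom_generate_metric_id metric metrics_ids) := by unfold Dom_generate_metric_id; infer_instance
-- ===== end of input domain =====

-- B replaces A's length-by-length itertools.product enumeration by a flat counter converted to a
-- bijective base-26 string (spreadsheet-column style); objective: more idiomatic, one flat loop.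
-- Both loops are ported with a fuel argument (metrics_ids.length + 1) that provably never runs out.

-- ===== PORT A =====
def pvAlphabet : List Char :=
  ['a','b','c','d','e','f','g','h','i','j','k','l','m','n','o','p','q','r','s','t','u','v','w','x','y','z']

-- product(alphabet, repeat=i), first coordinate slowest (itertools.product order)
def pvProd : Nat → List (List Char)
  | 0 => [[]]
  | i + 1 => pvAlphabet.flatMap (fun c => (pvProd i).map (c :: ·))

-- the inner 'for combination in product(...): if new_id not in metrics_ids: return new_id'
def pvScanA (metrics_ids : List String) : List (List Char) → Option String
  | [] => none
  | cs :: rest =>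
    let new_id := String.mk cs
    if metrics_ids.contains new_id then pvScanA metrics_ids rest else some new_id

-- the outer 'while True: ... i += 1' loop; fuel is a totality guard only (never exhausted, see proof)
def pvLoopA (metrics_ids : List String) : Nat → Nat → String
  | 0, _ => ""
  | fuel + 1, i =>
    match pvScanA metrics_ids (pvProd i) with
    | some s => s
    | none => pvLoopA metrics_ids fuel (i + 1)

def generate_metric_id (metric : String) (metrics_ids : List String) : String :=
  pvLoopA metrics_ids (metrics_ids.length + 1) 1

-- ===== PORT B =====
-- inner 'while m: m, r = divmod(m - 1, 26); s = chr(97 + r) + s' (recursion = remaining loop turns)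
def pvBij : Nat → List Char
  | 0 => []
  | n + 1 => pvBij (n / 26) ++ [Char.ofNat (97 + n % 26)]
decreasing_by exact Nat.lt_succ_of_le (Nat.div_le_self n 26)

-- the outer 'while True: ... n += 1' loop; fuel is a totality guard only (never exhausted, see proof)
def pvLoopB (metrics_ids : List String) : Nat → Nat → String
  | 0, _ => ""
  | fuel + 1, n =>
    let s := String.mk (pvBij n)
    if metrics_ids.contains s then pvLoopB metrics_ids fuel (n + 1) else s

def generate_metric_id_alt (metric : String) (metrics_ids : List String) : String :=
  pvLoopB metrics_ids (metrics_ids.length + 1) 1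

-- ===== PRECONDITION & SPEC =====
def Spec_generate_metric_id (metric : String) (metrics_ids : List String) (out : String) : Prop := out = generate_metric_id_alt metric metrics_ids
instance (metric : String) (metrics_ids : List String) (out : String) : Decidable (Spec_generate_metric_id metric metrics_ids out) := by unfold Spec_generate_metric_id; infer_instance

-- ===== CLAIM (what is proved, stated in full; the proofs are below) =====
def Claim_equal_generate_metric_id : Prop := ∀ (metric : String) (metrics_ids : List String), Dom_generate_metric_id metric metrics_ids → Spec_generate_metric_id metric metrics_ids (generate_metric_id metric metrics_ids)

-- ===== LEMMAS AND PROOFS =====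
set_option maxRecDepth 8192

-- String.mk round-trips through toList (String.mk l = String.ofList l)
theorem pvToList_mk (l : List Char) : (String.mk l).toList = l := Eq.symm (String.ofList_eq.mp rfl)

-- value of a candidate string: its 1-based rank in length-then-alphabetical order
def pvVal (l : List Char) : Nat := l.foldl (fun a c => 26 * a + (c.toNat - 96)) 0

-- total number of candidates of length ≤ k
def pvT : Nat → Nat
  | 0 => 0
  | k + 1 => pvT k + 26 ^ (k + 1)

-- first element of the candidate list not contained in metrics_ids
def pvFF (metrics_ids : List String) : List String → Option String
  | [] => none
  | s :: rest => if metrics_ids.contains s then pvFF metrics_ids rest else some s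

theorem pvFF_append (ids l1 l2 : List String) :
    pvFF ids (l1 ++ l2) = ((pvFF ids l1).elim (pvFF ids l2) some) := by
  induction l1 with
  | nil => simp [pvFF]
  | cons s t ih => simp only [List.cons_append, pvFF]; split <;> simp [ih]

theorem pvScanA_eq (ids : List String) (l : List (List Char)) :
    pvScanA ids l = pvFF ids (l.map String.mk) := by
  induction l with
  | nil => rfl
  | cons cs t ih => simp only [pvScanA, List.map_cons, pvFF]; split <;> simp [ih]

theorem pvLoopA_eq (ids : List String) (f i : Nat) :
    pvLoopA ids f i =
      ((pvFF ids (((List.range' i f).flatMap pvProd).map String.mk)).getD "") := by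
  induction f generalizing i with
  | zero => simp [pvLoopA, pvFF]
  | succ f ih =>
    rw [List.range'_succ]
    simp only [pvLoopA, List.flatMap_cons, List.map_append, pvFF_append, pvScanA_eq ids]
    cases h : pvFF ids ((pvProd i).map String.mk) <;> simp [ih]

theorem pvLoopB_eq (ids : List String) (f n : Nat) :
    pvLoopB ids f n =
      ((pvFF ids ((List.range' n f).map (fun m => String.mk (pvBij m)))).getD "") := by
  induction f generalizing n with
  | zero => simp [pvLoopB, pvFF]
  | succ f ih =>
    rw [List.range'_succ]
    simp only [pvLoopB, List.map_cons, pvFF]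
    split <;> simp [ih]

-- every element of pvProd i has length i with all characters in pvAlphabet
theorem pvProd_mem {i : Nat} {s : List Char} (h : s ∈ pvProd i) :
    s.length = i ∧ ∀ c ∈ s, c ∈ pvAlphabet := by
  induction i generalizing s with
  | zero =>
    simp only [pvProd, List.mem_singleton] at h
    simp [h]
  | succ i ih =>
    simp only [pvProd, List.mem_flatMap, List.mem_map] at h
    obtain ⟨c, hc, t, ht, rfl⟩ := h
    obtain ⟨hlen, hall⟩ := ih ht
    refine ⟨by simp [hlen], ?_⟩
    intro d hd
    rcases List.mem_cons.1 hd with rfl | hd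
    · exact hc
    · exact hall d hd

-- characters of the alphabet: codes and reconstruction
theorem pvAlpha_char : ∀ c ∈ pvAlphabet, 97 ≤ c.toNat ∧ c.toNat ≤ 122 := by
  have h : (pvAlphabet.all (fun c => decide (97 ≤ c.toNat) && decide (c.toNat ≤ 122))) = true := by
    decide
  intro c hc
  have hb := List.all_eq_true.mp h c hc
  exact ⟨of_decide_eq_true (Bool.and_elim_left hb), of_decide_eq_true (Bool.and_elim_right hb)⟩

-- foldl with arbitrary accumulator
theorem pvVal_aux (s : List Char) (a : Nat) :
    s.foldl (fun a c => 26 * a + (c.toNat - 96)) a = a * 26 ^ s.length + pvVal s := by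
  induction s generalizing a with
  | nil => simp [pvVal]
  | cons c t ih =>
    rw [List.foldl_cons, ih]
    conv_rhs => rw [pvVal, List.foldl_cons, ih]
    simp only [List.length_cons]
    ring

theorem pvVal_cons (c : Char) (s : List Char) :
    pvVal (c :: s) = (c.toNat - 96) * 26 ^ s.length + pvVal s := by
  simp only [pvVal, List.foldl_cons]
  rw [pvVal_aux]
  simp [pvVal]

theorem pvVal_concat (s : List Char) (c : Char) :
    pvVal (s ++ [c]) = 26 * pvVal s + (c.toNat - 96) := by
  simp [pvVal, List.foldl_append]

-- 26 consecutive blocks of width w concatenate to one range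
theorem pvBlocks (w b : Nat) : ∀ j : Nat,
    (List.range' 1 j).flatMap (fun v => List.range' (b + v * w) w) = List.range' (b + w) (j * w) := by
  intro j
  induction j with
  | zero => simp
  | succ j ih =>
    rw [List.range'_1_concat, List.flatMap_append, ih]
    simp only [List.flatMap_cons, List.flatMap_nil, List.append_nil]
    rw [show b + (1 + j) * w = (b + w) + j * w from by ring, List.range'_append_1]
    congr 1
    ring

theorem pvAlphabet_eq : pvAlphabet = (List.range' 1 26).map (fun v => Char.ofNat (96 + v)) := by decide

theorem pvChar_val {v : Nat} (h1 : 1 ≤ v) (h2 : v ≤ 26) : (Char.ofNat (96 + v)).toNat - 96 = v := by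
  interval_cases v <;> decide

-- the values of pvProd (i+1) are exactly the consecutive range following pvT i
theorem pvProd_vals : ∀ i : Nat,
    (pvProd (i + 1)).map pvVal = List.range' (pvT i + 1) (26 ^ (i + 1)) := by
  intro i
  induction i with
  | zero => decide
  | succ i ih =>
    show (pvAlphabet.flatMap (fun c => (pvProd (i+1)).map (c :: ·))).map pvVal = _
    rw [List.map_flatMap]
    have hmap : ∀ c ∈ pvAlphabet,
        ((pvProd (i+1)).map (c :: ·)).map pvVal
          = List.range' ((pvT i + 1) + (c.toNat - 96) * 26 ^ (i + 1)) (26 ^ (i + 1)) := by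
      intro c _
      rw [List.map_map]
      have h1 : ((pvProd (i+1)).map (pvVal ∘ (c :: ·)))
          = ((pvProd (i+1)).map (fun s => (c.toNat - 96) * 26 ^ (i+1) + pvVal s)) := by
        apply List.map_congr_left
        intro s hs
        show pvVal (c :: s) = _
        rw [pvVal_cons, (pvProd_mem hs).1]
      rw [h1, show (fun s => (c.toNat - 96) * 26 ^ (i+1) + pvVal s) = ((fun n => (c.toNat - 96) * 26 ^ (i+1) + n) ∘ pvVal) from rfl,
        ← List.map_map, ih, List.map_add_range']
      congr 1
      omega
    rw [List.flatMap_congr hmap, pvAlphabet_eq, List.flatMap_map]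
    have h2 : ∀ v ∈ List.range' 1 26,
        (fun c : Char => List.range' ((pvT i + 1) + (c.toNat - 96) * 26 ^ (i + 1)) (26 ^ (i + 1))) (Char.ofNat (96 + v))
          = List.range' ((pvT i + 1) + v * 26 ^ (i + 1)) (26 ^ (i + 1)) := by
      intro v hv
      have hv' := List.mem_range'_1.1 hv
      dsimp only
      rw [pvChar_val (by omega) (by omega)]
    rw [List.flatMap_congr h2, pvBlocks]
    show List.range' (pvT i + 1 + 26 ^ (i + 1)) (26 * 26 ^ (i + 1)) = List.range' (pvT (i+1) + 1) (26 ^ (i + 2))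
    congr 1
    · show pvT i + 1 + 26 ^ (i+1) = (pvT i + 26 ^ (i+1)) + 1
      omega
    · ring

-- round trips between the counter and the string
theorem pvVal_pvBij : ∀ n : Nat, pvVal (pvBij n) = n := by
  intro n
  induction n using Nat.strong_induction_on with
  | _ n ih =>
    match n with
    | 0 => simp [pvBij, pvVal]
    | n + 1 =>
      rw [pvBij, pvVal_concat, ih (n / 26) (Nat.lt_succ_of_le (Nat.div_le_self n 26))]
      have h26 : n % 26 < 26 := Nat.mod_lt n (by omega)
      have hv : (Char.ofNat (97 + n % 26)).toNat = 97 + n % 26 := by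
        have hval : Nat.isValidChar (97 + n % 26) := Or.inl (by omega)
        simp [Char.ofNat, hval]
      omega

theorem pvBij_pvVal : ∀ s : List Char, (∀ c ∈ s, c ∈ pvAlphabet) → pvBij (pvVal s) = s := by
  intro s
  induction s using List.reverseRecOn with
  | nil => intro _; simp [pvVal, pvBij]
  | append_singleton l c ih =>
    intro hall
    have hc : c ∈ pvAlphabet := hall c (by simp)
    obtain ⟨h97, h122⟩ := pvAlpha_char c hc
    rw [pvVal_concat]
    rw [show 26 * pvVal l + (c.toNat - 96) = (26 * pvVal l + (c.toNat - 97)) + 1 from by omega, pvBij]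
    have hd : (26 * pvVal l + (c.toNat - 97)) / 26 = pvVal l := by omega
    have hm : (26 * pvVal l + (c.toNat - 97)) % 26 = c.toNat - 97 := by omega
    rw [hd, hm, ih (fun d hd => hall d (by simp [hd]))]
    rw [show 97 + (c.toNat - 97) = c.toNat from by omega, Char.ofNat_toNat]

-- each pvProd block is a range of pvBij values
theorem pvProd_bij (i : Nat) :
    (List.range' (pvT i + 1) (26 ^ (i + 1))).map pvBij = pvProd (i + 1) := by
  calc (List.range' (pvT i + 1) (26 ^ (i + 1))).map pvBij
      = ((pvProd (i+1)).map pvVal).map pvBij := by rw [pvProd_vals]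
    _ = (pvProd (i+1)).map (pvBij ∘ pvVal) := by rw [List.map_map]
    _ = (pvProd (i+1)).map id :=
        List.map_congr_left (fun s hs => pvBij_pvVal s (pvProd_mem hs).2)
    _ = pvProd (i+1) := List.map_id _

-- concatenating the length-blocks gives the flat enumeration
theorem pvFlat (k : Nat) :
    (List.range' 1 k).flatMap pvProd = (List.range' 1 (pvT k)).map pvBij := by
  induction k with
  | zero => simp [pvT]
  | succ k ih =>
    rw [List.range'_1_concat, List.flatMap_append, ih]
    simp only [List.flatMap_cons, List.flatMap_nil, List.append_nil]
    rw [show (1 : Nat) + k = k + 1 from by omega, ← pvProd_bij k]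
    rw [show pvT k + 1 = 1 + pvT k from by omega, ← List.map_append, List.range'_append_1]
    rfl

theorem pvT_ge (k : Nat) : k ≤ pvT k := by
  induction k with
  | zero => simp [pvT]
  | succ k ih =>
    have : 1 ≤ 26 ^ (k + 1) := Nat.one_le_pow _ _ (by omega)
    simp only [pvT]; omega

-- the first (len+1) candidates are pairwise distinct; by pigeonhole one of them is free
theorem pvFree (ids : List String) :
    ∃ s ∈ (List.range' 1 (ids.length + 1)).map (fun m => String.mk (pvBij m)),
      ¬ (ids.contains s = true) := by
  by_contra hall
  push_neg at hall
  set l := (List.range' 1 (ids.length + 1)).map (fun m => String.mk (pvBij m)) with hl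
  have hnodup : l.Nodup := by
    refine List.Nodup.map ?_ List.nodup_range'
    intro a b hab
    have h1 : pvBij a = pvBij b := by
      have h := congrArg String.toList hab
      rwa [pvToList_mk, pvToList_mk] at h
    have h2 := congrArg pvVal h1
    rwa [pvVal_pvBij, pvVal_pvBij] at h2
  have hsub : l ⊆ ids := by
    intro s hs
    have := hall s hs
    simpa using this
  have h1 : l.toFinset.card = ids.length + 1 := by
    rw [List.toFinset_card_of_nodup hnodup]
    simp [hl]
  have h2 : l.toFinset ⊆ ids.toFinset := fun x hx =>
    List.mem_toFinset.2 (hsub (List.mem_toFinset.1 hx))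
  have h3 := Finset.card_le_card h2
  have h4 := ids.toFinset_card_le
  omega

theorem pvFF_of_mem_free (ids : List String) (l : List String)
    (h : ∃ s ∈ l, ¬ (ids.contains s = true)) : ∃ s, pvFF ids l = some s := by
  induction l with
  | nil => simp at h
  | cons a t ih =>
    simp only [pvFF]
    split
    · rename_i hc
      obtain ⟨s, hs, hfree⟩ := h
      rcases List.mem_cons.1 hs with rfl | hs
      · exact absurd hc hfree
      · exact ih ⟨s, hs, hfree⟩
    · exact ⟨a, rfl⟩

-- ===== VERDICT (by name: the statement is the Claim_ definition above) =====
theorem generate_metric_id_spec : Claim_equal_generate_metric_id := by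
  intro metric ids _
  unfold Spec_generate_metric_id generate_metric_id generate_metric_id_alt
  rw [pvLoopA_eq, pvLoopB_eq, pvFlat]
  set N := ids.length + 1 with hN
  obtain ⟨s, hffB⟩ := pvFF_of_mem_free ids _ (pvFree ids)
  have hsplit : List.range' 1 (pvT N) = List.range' 1 N ++ List.range' (1 + N) (pvT N - N) := by
    rw [List.range'_append_1]
    congr 1
    have := pvT_ge N
    omega
  rw [hsplit, List.map_append, List.map_append, List.map_map]
  have hcomp : (String.mk ∘ pvBij) = (fun m => String.mk (pvBij m)) := rfl
  rw [hcomp, pvFF_append, hffB]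
  rfl
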